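-- pv_equiv track=rewrite | github.com/Surajgupta5/aapkapainter-tasks | get_scores.py | countingRuns
-- ===== SOURCE A (Python) =====
-- def countingRuns(a, n):
--     p1, p2, flag = 0, 0, 1
--     for i in range(n):
--         if flag != 0:
--             if a[i] % 2 != 0:
--                 p1 = p1 + a[i]
--                 flag = 0  # for changing the strike to player 2
--                 continue
--             else:
--                 p1 = p1 + a[i]
--                 continue
--         else:
--             if a[i] % 2 != 0:
--                 p2 = p2 + a[i]
--                 flag = 1  # for changing the strike to player 1
--                 continue
--             else:
--                 p2 = p2 + a[i]
--                 continue
--     return p1, p2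
-- ===== SOURCE B (Python) =====
-- def countingRuns(a, n):
--     # Pass 1: cut the first n elements into "runs", each run ending at an odd value
--     # (a trailing all-even partial run is appended too, possibly empty-summed as 0).
--     runs = []
--     acc = 0
--     for i in range(n):
--         acc += a[i]
--         if a[i] % 2 != 0:
--             runs.append(acc)
--             acc = 0
--     runs.append(acc)
--     # Pass 2: even-indexed runs go to player 1, odd-indexed runs to player 2.
--     p1, p2 = 0, 0
--     for k, r in enumerate(runs):
--         if k % 2 == 0:
--             p1 += r
--         else:
--             p2 += r
--     return p1, p2
-- ===== Notes on version B (the rewrite author's own statement) =====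
-- stated objective: alternative
-- what changed: Replaced the stateful flag-toggling single loop with a two-phase decomposition: first cut the prefix into runs ending at odd values, then assign even-indexed run sums to p1 and odd-indexed runs to p2.
import Mathlib
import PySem

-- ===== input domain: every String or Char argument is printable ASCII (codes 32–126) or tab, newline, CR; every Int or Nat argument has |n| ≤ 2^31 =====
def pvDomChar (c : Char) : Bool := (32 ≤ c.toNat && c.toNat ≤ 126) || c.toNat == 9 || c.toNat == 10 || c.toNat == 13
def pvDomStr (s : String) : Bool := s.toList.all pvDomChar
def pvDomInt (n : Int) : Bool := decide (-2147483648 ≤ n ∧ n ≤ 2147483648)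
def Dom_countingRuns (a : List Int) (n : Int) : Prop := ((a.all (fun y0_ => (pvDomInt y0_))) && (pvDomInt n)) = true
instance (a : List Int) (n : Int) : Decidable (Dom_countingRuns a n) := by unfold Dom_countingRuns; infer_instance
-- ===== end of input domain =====

-- B replaces the stateful flag-toggling loop by a two-phase decomposition (cut into
-- runs ending at odd values, then assign alternate runs); alternative, same cost.

-- ===== PORT A =====
-- one loop iteration of A: state (p1, p2, flag)
def pvStepA (a : List Int) (st : Int × Int × Int) (i : Int) : Int × Int × Int :=
  let x := PySem.List.pyGetD a i 0   -- a[i]; total under Pre_ (i < n ≤ len a)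
  if st.2.2 ≠ 0 then
    if PySem.Int.mod x 2 ≠ 0 then (st.1 + x, st.2.1, 0)
    else (st.1 + x, st.2.1, st.2.2)
  else
    if PySem.Int.mod x 2 ≠ 0 then (st.1, st.2.1 + x, 1)
    else (st.1, st.2.1 + x, st.2.2)

def countingRuns (a : List Int) (n : Int) : Int × Int :=
  let s := (PySem.List.pyRange 0 n 1).foldl (pvStepA a) (0, 0, 1)
  (s.1, s.2.1)

-- ===== PORT B =====
-- pass 1 iteration of B: state (runs, acc)
def pvStepRun (a : List Int) (st : List Int × Int) (i : Int) : List Int × Int :=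
  let x := PySem.List.pyGetD a i 0   -- a[i]; total under Pre_
  let acc := st.2 + x
  if PySem.Int.mod x 2 ≠ 0 then (st.1 ++ [acc], 0) else (st.1, acc)

-- pass 2 iteration of B: state (p1, p2), element (k, r) from enumerate(runs)
def pvStepAlt (p : Int × Int) (kr : Int × Int) : Int × Int :=
  if PySem.Int.mod kr.1 2 = 0 then (p.1 + kr.2, p.2) else (p.1, p.2 + kr.2)

def countingRuns_alt (a : List Int) (n : Int) : Int × Int :=
  let s := (PySem.List.pyRange 0 n 1).foldl (pvStepRun a) ([], 0)
  let runs := s.1 ++ [s.2]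
  (PySem.List.enumerate runs).foldl pvStepAlt (0, 0)

-- ===== PRECONDITION & SPEC =====
-- Pre_ excludes exactly n > len(a), where Python A raises IndexError at i = len(a).
def Pre_countingRuns (a : List Int) (n : Int) : Prop := n ≤ (a.length : Int)
instance (a : List Int) (n : Int) : Decidable (Pre_countingRuns a n) := by unfold Pre_countingRuns; infer_instance
def pvWitness_countingRuns : List Int × Int := ([3, 2, 4, 5, 6, 7], 6)

def Spec_countingRuns (a : List Int) (n : Int) (out : Int × Int) : Prop := out = countingRuns_alt a n
instance (a : List Int) (n : Int) (out : Int × Int) : Decidable (Spec_countingRuns a n out) := by unfold Spec_countingRuns; infer_instance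

-- ===== CLAIM (what is proved, stated in full; the proofs are below) =====
def Claim_equal_countingRuns : Prop := ∀ (a : List Int) (n : Int), Dom_countingRuns a n → Pre_countingRuns a n → Spec_countingRuns a n (countingRuns a n)

-- ===== LEMMAS AND PROOFS =====

-- result of B's second pass, as a function of the run list
def pvEO (l : List Int) : Int × Int := (PySem.List.enumerate l).foldl pvStepAlt (0, 0)

theorem pvEnum_append (l : List Int) (x : Int) (s : Int) :
    PySem.List.enumerate (l ++ [x]) s = PySem.List.enumerate l s ++ [(s + l.length, x)] := by
  induction l generalizing s with
  | nil => simp [PySem.List.enumerate]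
  | cons y t ih =>
      simp only [List.cons_append, PySem.List.enumerate, ih, List.length_cons]
      have h : s + 1 + (t.length : Int) = s + ((t.length + 1 : Nat) : Int) := by push_cast; ring
      rw [h]

theorem pvEO_append (l : List Int) (x : Int) :
    pvEO (l ++ [x]) =
      if l.length % 2 = 0 then ((pvEO l).1 + x, (pvEO l).2) else ((pvEO l).1, (pvEO l).2 + x) := by
  unfold pvEO
  rw [pvEnum_append, List.foldl_append]
  simp only [List.foldl_cons, List.foldl_nil, pvStepAlt, zero_add]
  rw [PySem.Int.mod_eq_emod_of_pos (by norm_num : (0:Int) < 2)]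
  by_cases h : l.length % 2 = 0
  · rw [if_pos (by omega), if_pos h]
  · rw [if_neg (by omega), if_neg h]

-- A's state, rebuilt from B's state (runs, acc)
def pvMk (runs : List Int) (acc : Int) : Int × Int × Int :=
  if runs.length % 2 = 0 then ((pvEO runs).1 + acc, (pvEO runs).2, 1)
  else ((pvEO runs).1, (pvEO runs).2 + acc, 0)

theorem pvMain (idxs : List Int) (a : List Int) (runs : List Int) (acc : Int) :
    idxs.foldl (pvStepA a) (pvMk runs acc) =
      pvMk (idxs.foldl (pvStepRun a) (runs, acc)).1 (idxs.foldl (pvStepRun a) (runs, acc)).2 := by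
  induction idxs generalizing runs acc with
  | nil => rfl
  | cons i t ih =>
      simp only [List.foldl_cons]
      have hodd : ∀ m : Nat, (m + 1) % 2 = 0 ↔ ¬ m % 2 = 0 := by omega
      have hstep : pvStepA a (pvMk runs acc) i =
          pvMk (pvStepRun a (runs, acc) i).1 (pvStepRun a (runs, acc) i).2 := by
        by_cases hp : runs.length % 2 = 0 <;>
          by_cases hx : PySem.List.pyGetD a i 0 % 2 = 1 <;>
          simp [pvStepA, pvStepRun, pvMk, hp, hx, pvEO_append, hodd, Prod.ext_iff] <;>
          ring
      rw [hstep, ih]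

-- ===== VERDICT (by name: the statement is the Claim_ definition above) =====
theorem countingRuns_spec : Claim_equal_countingRuns := by
  intro a n _ _
  unfold Spec_countingRuns countingRuns countingRuns_alt
  have h0 : (0, 0, 1) = pvMk [] 0 := by simp [pvMk, pvEO, PySem.List.enumerate]
  rw [h0, pvMain]
  set s := (PySem.List.pyRange 0 n 1).foldl (pvStepRun a) ([], 0) with hs
  show ((pvMk s.1 s.2).1, (pvMk s.1 s.2).2.1) = pvEO (s.1 ++ [s.2])
  rw [pvEO_append]
  unfold pvMk
  by_cases hp : s.1.length % 2 = 0 <;> simp [hp]
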